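-- pv_equiv track=rewrite | github.com/anpoli99/NyuProgTeamMeetings2022-23 | Week 3/Week 3 Solutions/E/E_joinstrings.py | joinstrings
-- ===== SOURCE A (Python) =====
-- def joinstrings(n, s, a, b):
--     # First we'll find the order of the indices in the final string, then we can concatenate them at the end
--     # To do this, notice that when we concatenate two strings (i)(j), it becomes one string
--     # beginning with 'i' and ending with 'j'
--     # So the only thing we need to know to join two strings is which original string was
--     # the first and which was the last
--
--     next = [-1] * (n + 1) # next[i] = j if 'j' is the index of the string concatenated after 'i'
--     last = [0] * (n + 1) # last[i] will store the last string concatenated to 'i'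
--                         # For example, if (1 2) is concatenated to (3 4), then last[1] = 4, next[1] = 2
--
--     for i in range(1, n + 1):
--         last[i] = i # Initially, each string is its own last string
--
--     is_beginning = [True] * (n + 1) # is_beginning[i] = True if 'i' is the first string in the final string
--
--     for i in range(1, n):
--         x,y = a[i], b[i]
--         next[last[x]] = y # 'y' is the string concatenated to the end of 'x'
--         last[x] = last[y] # 'x' now ends with the same string as 'y'
--         is_beginning[y] = False # 'y' is no longer the beginning of a string
--
--     # Now we can find the beginning of the final string
--     beginning = 1
--     while not is_beginning[beginning]:
--         beginning += 1
--
--     # Join the strings to get the final string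
--     final_indices = []
--     for i in range(n):
--         final_indices.append(beginning)
--         beginning = next[beginning]
--
--     return ''.join([s[i] for i in final_indices])
-- ===== SOURCE B (Python) =====
-- def joinstrings(n, s, a, b):
--     # Maintain each live chain as an ordered list of original indices, keyed by its head.
--     group = {i: [i] for i in range(1, n + 1)}
--     for i in range(1, n):
--         x, y = a[i], b[i]
--         group[x].extend(group[y])
--         del group[y]
--     order = next(iter(group.values()))
--     return ''.join(s[i] for i in order)
-- ===== Notes on version B (the rewrite author's own statement) =====
-- stated objective: simpler
-- what changed: Replaces A's three parallel pointer arrays (next/last/is_beginning) plus a head scan and a pointer chase by one dict mapping each live chain head to its ordered member list, merged per step; the single surviving list is the final order.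
-- outside the precondition, e.g. on joinstrings(2, ['', 'a', 'b'], [0, 1], [0, 1]): A returns 'bb', B returns 'b'; on joinstrings(3, ['', 'a', 'b', 'c'], [0, 1, 1], [0, 2, 2]): A returns 'abb', B raises KeyError
import Mathlib
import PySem

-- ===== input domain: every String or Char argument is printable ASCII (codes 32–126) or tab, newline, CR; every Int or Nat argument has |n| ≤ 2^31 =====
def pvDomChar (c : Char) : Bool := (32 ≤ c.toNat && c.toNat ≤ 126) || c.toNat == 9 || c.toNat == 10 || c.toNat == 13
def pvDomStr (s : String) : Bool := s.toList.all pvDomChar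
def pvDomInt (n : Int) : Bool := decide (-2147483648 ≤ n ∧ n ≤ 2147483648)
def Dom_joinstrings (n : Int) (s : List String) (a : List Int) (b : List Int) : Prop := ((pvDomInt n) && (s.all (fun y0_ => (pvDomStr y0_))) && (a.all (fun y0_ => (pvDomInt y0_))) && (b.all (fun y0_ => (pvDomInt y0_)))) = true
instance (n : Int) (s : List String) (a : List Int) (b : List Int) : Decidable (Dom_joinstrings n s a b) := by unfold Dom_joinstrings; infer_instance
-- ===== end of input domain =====

-- B replaces A's three pointer arrays (next/last/is_beginning) + head scan + pointer chase
-- by one dict mapping each live chain head to its ordered member list (objective: simpler).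

-- ===== PORT A =====
-- one merge step of A's loop body: state (next, last, is_beginning), input (a[i], b[i])
def stepA (st : List Int × List Int × List Bool) (xy : Int × Int) :
    List Int × List Int × List Bool :=
  let nx := st.1; let la := st.2.1; let ib := st.2.2
  (PySem.List.pySetD nx (PySem.List.pyGetD la xy.1 0) xy.2,
   PySem.List.pySetD la xy.1 (PySem.List.pyGetD la xy.2 0),
   PySem.List.pySetD ib xy.2 false)

-- 'while not is_beginning[beginning]: beginning += 1' (fuel-bounded; Python raises when it
-- runs off the list — those inputs are outside Pre_)
def whileFind (ib : List Bool) (beg : Int) : Nat → Int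
  | 0 => beg
  | fuel + 1 =>
    match PySem.List.pyGet? ib beg with
    | some true => beg
    | some false => whileFind ib (beg + 1) fuel
    | none => beg

def joinstrings (n : Int) (s : List String) (a : List Int) (b : List Int) : String :=
  let next0 : List Int := List.replicate (n + 1).toNat (-1)
  let last0 : List Int := List.replicate (n + 1).toNat 0
  let last1 := (PySem.List.pyRange 1 (n + 1) 1).foldl (fun l i => PySem.List.pySetD l i i) last0
  let isb0 : List Bool := List.replicate (n + 1).toNat true
  let st := (PySem.List.pyRange 1 n 1).foldl
      (fun st i => stepA st (PySem.List.pyGetD a i 0, PySem.List.pyGetD b i 0))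
      (next0, last1, isb0)
  let beginning := whileFind st.2.2 1 (n + 1).toNat
  let fin := (PySem.List.pyRange 0 n 1).foldl
      (fun (p : List Int × Int) _ => (p.1 ++ [p.2], PySem.List.pyGetD st.1 p.2 (-1)))
      ([], beginning)
  PySem.Str.join "" (fin.1.map (fun i => PySem.List.pyGetD s i ""))

-- ===== PORT B =====
-- one step of B's loop: group[x].extend(group[y]); del group[y]
def stepB (d : PySem.Dict Int (List Int)) (xy : Int × Int) : PySem.Dict Int (List Int) :=
  let gy := d.getD xy.2 []
  (d.insert xy.1 (d.getD xy.1 [] ++ gy)).erase xy.2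

def joinstrings_alt (n : Int) (s : List String) (a : List Int) (b : List Int) : String :=
  let g0 : PySem.Dict Int (List Int) :=
    (PySem.List.pyRange 1 (n + 1) 1).foldl (fun d i => d.insert i [i]) PySem.Dict.empty
  let g := (PySem.List.pyRange 1 n 1).foldl
      (fun d i => stepB d (PySem.List.pyGetD a i 0, PySem.List.pyGetD b i 0)) g0
  let order := (PySem.Dict.values g).headD []
  PySem.Str.join "" (order.map (fun i => PySem.List.pyGetD s i ""))

-- ===== PRECONDITION & SPEC =====
-- validity check for the merge sequence: each step must join two distinct live chain heads
def stepP (o : Option (List Int)) (xy : Int × Int) : Option (List Int) :=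
  match o with
  | none => none
  | some L => if xy.1 ∈ L ∧ xy.2 ∈ L ∧ xy.1 ≠ xy.2 then some (L.erase xy.2) else none

-- Pre_ is the natural domain of this competitive-programming solution: n ≥ 1 strings
-- (s is 1-indexed with a dummy s[0], like a and b), and the n-1 merge steps form a valid
-- concatenation sequence (each joins two distinct live chain heads).  On malformed merge
-- sequences A either raises IndexError or silently returns an accidental string (stale
-- pointers / negative-index wraparound) while B raises KeyError or returns the intended
-- surviving chain, so those inputs are excluded.
def Pre_joinstrings (n : Int) (s : List String) (a : List Int) (b : List Int) : Prop :=
  1 ≤ n ∧ n < (s.length : Int) ∧ (2 ≤ n → (n ≤ (a.length : Int) ∧ n ≤ (b.length : Int))) ∧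
  (((PySem.List.pyRange 1 n 1).map
      (fun i => (PySem.List.pyGetD a i 0, PySem.List.pyGetD b i 0))).foldl stepP
    (some (PySem.List.pyRange 1 (n + 1) 1))).isSome
instance (n : Int) (s : List String) (a : List Int) (b : List Int) :
    Decidable (Pre_joinstrings n s a b) := by unfold Pre_joinstrings; infer_instance

def pvWitness_joinstrings : Int × List String × List Int × List Int :=
  (2, ["", "ab", "c"], [0, 1], [0, 2])

def Spec_joinstrings (n : Int) (s : List String) (a : List Int) (b : List Int) (out : String) : Prop :=
  out = joinstrings_alt n s a b
instance (n : Int) (s : List String) (a : List Int) (b : List Int) (out : String) :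
    Decidable (Spec_joinstrings n s a b out) := by unfold Spec_joinstrings; infer_instance

-- ===== CLAIM (what is proved, stated in full; the proofs are below) =====
def Claim_equal_joinstrings : Prop :=
  ∀ (n : Int) (s : List String) (a : List Int) (b : List Int),
    Dom_joinstrings n s a b → Pre_joinstrings n s a b →
    Spec_joinstrings n s a b (joinstrings n s a b)

-- ===== LEMMAS AND PROOFS =====

-- proof-only abbreviations over the dict's item list
def pvKeys (its : List (Int × List Int)) : List Int := its.map (·.1)
def pvVals (its : List (Int × List Int)) (u : Int) : Prop := ∃ p ∈ its, u ∈ p.2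
-- u immediately precedes v in l
def pvAdj (u v : Int) (l : List Int) : Prop := ∃ k : Nat, l[k]? = some u ∧ l[k + 1]? = some v

-- the coupling invariant between A's arrays and B's dict items
def pvInv (n : Int) (nx la : List Int) (ib : List Bool) (its : List (Int × List Int)) : Prop :=
  nx.length = (n + 1).toNat ∧ la.length = (n + 1).toNat ∧ ib.length = (n + 1).toNat ∧
  (pvKeys its).Nodup ∧
  (∀ p ∈ its, p.2.head? = some p.1) ∧
  (∀ p ∈ its, p.2.Nodup) ∧
  (∀ p ∈ its, ∀ q ∈ its, p ≠ q → ∀ u, u ∈ p.2 → u ∉ q.2) ∧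
  (∀ u, pvVals its u ↔ 1 ≤ u ∧ u ≤ n) ∧
  (∀ p ∈ its, ∀ u v, pvAdj u v p.2 → PySem.List.pyGet? nx u = some v) ∧
  (∀ p ∈ its, ∃ t, p.2.getLast? = some t ∧ PySem.List.pyGet? la p.1 = some t) ∧
  (∀ u : Int, 1 ≤ u → u ≤ n → PySem.List.pyGet? ib u = some (decide (u ∈ pvKeys its)))

lemma pvGetSet {α : Type} (xs : List α) (t u : Int) (v : α) (ht0 : 0 ≤ t) (ht : t < (xs.length : Int))
    (hu0 : 0 ≤ u) (hu : u < (xs.length : Int)) :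
    PySem.List.pyGet? (PySem.List.pySetD xs t v) u
      = some (if u = t then v else (PySem.List.pyGet? xs u).getD v) := by
  rw [PySem.List.pySetD_of_nonneg xs v ht0, PySem.List.pyGet?_of_nonneg _ hu0,
      PySem.List.pyGet?_of_nonneg _ hu0, List.getElem?_set]
  have h1 : u.toNat < xs.length := by omega
  by_cases h : u = t
  · have h3 : t.toNat < xs.length := by omega
    simp [h, h3]
  · have h2 : t.toNat ≠ u.toNat := by omega
    simp [h, h2, List.getElem?_eq_getElem h1]

-- basic facts about pvAdj
lemma pvAdj_mem {u v : Int} {l : List Int} (h : pvAdj u v l) : u ∈ l := by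
  obtain ⟨k, hk, -⟩ := h
  exact List.mem_of_getElem? hk

lemma pvAdj_singleton {u v w : Int} (h : pvAdj u v [w]) : False := by
  obtain ⟨k, hk, hk1⟩ := h
  rw [List.getElem?_eq_some_iff] at hk1
  obtain ⟨hlt, -⟩ := hk1
  simp at hlt

lemma pvAdj_cons {u v c : Int} {l : List Int} (h : pvAdj u v l) : pvAdj u v (c :: l) := by
  obtain ⟨k, hk, hk1⟩ := h
  exact ⟨k + 1, by simpa using hk, by simpa using hk1⟩

lemma pvAdj_append_cases {u v : Int} {l1 l2 : List Int} (h : pvAdj u v (l1 ++ l2)) :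
    pvAdj u v l1 ∨ pvAdj u v l2 ∨ (l1.getLast? = some u ∧ l2.head? = some v) := by
  obtain ⟨k, hk, hk1⟩ := h
  by_cases hlt : k + 1 < l1.length
  · left
    exact ⟨k, by rw [List.getElem?_append_left (by omega)] at hk; exact hk,
            by rw [List.getElem?_append_left hlt] at hk1; exact hk1⟩
  · by_cases hge : l1.length ≤ k
    · right; left
      refine ⟨k - l1.length, ?_, ?_⟩
      · rw [List.getElem?_append_right hge] at hk; exact hk
      · rw [List.getElem?_append_right (by omega)] at hk1
        rw [show k + 1 - l1.length = k - l1.length + 1 by omega] at hk1; exact hk1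
    · right; right
      have hk' : k = l1.length - 1 := by omega
      have hlen : 0 < l1.length := by omega
      constructor
      · rw [List.getElem?_append_left (by omega)] at hk
        rw [List.getLast?_eq_getElem?, ← hk']; exact hk
      · rw [List.getElem?_append_right (by omega)] at hk1
        rw [show k + 1 - l1.length = 0 by omega] at hk1
        rw [List.head?_eq_getElem?]; exact hk1

lemma pvAdj_ne_last {u v : Int} {l : List Int} (hnd : l.Nodup) (h : pvAdj u v l) :
    l.getLast? ≠ some u := by
  obtain ⟨k, hk, hk1⟩ := h
  rw [List.getElem?_eq_some_iff] at hk hk1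
  obtain ⟨hlt, hval⟩ := hk; obtain ⟨hlt1, hval1⟩ := hk1
  rw [List.getLast?_eq_getElem?]
  intro hcon
  rw [List.getElem?_eq_some_iff] at hcon
  obtain ⟨hl2, hval2⟩ := hcon
  have := List.Nodup.getElem_inj_iff hnd (i := l.length - 1) (j := k) (hi := hl2) (hj := hlt)
  rw [hval2, hval] at this
  omega

lemma pvKeyInj (its : List (Int × List Int)) (hnd : (pvKeys its).Nodup)
    (p q : Int × List Int) (hp : p ∈ its) (hq : q ∈ its) (h : p.1 = q.1) : p = q :=
  List.inj_on_of_nodup_map hnd hp hq h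

lemma pvKeysFilterMap (its : List (Int × List Int)) (f : Int × List Int → Int × List Int)
    (hf : ∀ p, (f p).1 = p.1) (y : Int) :
    pvKeys ((its.map f).filter (fun p => !(p.1 == y)))
      = (pvKeys its).filter (fun u => !(u == y)) := by
  induction its with
  | nil => rfl
  | cons p its ih =>
    simp only [List.map_cons, List.filter_cons, pvKeys] at ih ⊢
    by_cases h : p.1 = y
    · simpa [hf, h] using ih
    · simpa [hf, h] using ih

lemma pvFoldPNone (ms : List (Int × Int)) : ms.foldl stepP none = none := by
  induction ms with
  | nil => rfl
  | cons m ms ih => simpa [stepP] using ih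

-- the one-step preservation lemma
lemma pvStepPreserve (n : Int) (nx la : List Int) (ib : List Bool) (d : PySem.Dict Int (List Int))
    (x y : Int) (hInv : pvInv n nx la ib d.items)
    (hx : x ∈ pvKeys d.items) (hy : y ∈ pvKeys d.items) (hxy : x ≠ y) :
    pvInv n (stepA (nx, la, ib) (x, y)).1 (stepA (nx, la, ib) (x, y)).2.1
      (stepA (nx, la, ib) (x, y)).2.2 (stepB d (x, y)).items ∧
    (∀ u, u ∈ pvKeys (stepB d (x, y)).items ↔ (u ∈ pvKeys d.items ∧ u ≠ y)) := by
  obtain ⟨hnxl, hlal, hibl, hknd, hhead, hnod, hdisj, hmem, hadj, hlast, hib⟩ := hInv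
  obtain ⟨lx, hpx⟩ : ∃ l, (x, l) ∈ d.items := by
    obtain ⟨p, hp, hp1⟩ : ∃ p ∈ d.items, p.1 = x := by simpa [pvKeys, List.mem_map] using hx
    exact ⟨p.2, by rw [← hp1]; exact hp⟩
  obtain ⟨ly, hpy⟩ : ∃ l, (y, l) ∈ d.items := by
    obtain ⟨p, hp, hp1⟩ : ∃ p ∈ d.items, p.1 = y := by simpa [pvKeys, List.mem_map] using hy
    exact ⟨p.2, by rw [← hp1]; exact hp⟩
  have hpxy : ((x, lx) : Int × List Int) ≠ (y, ly) := by
    intro h; exact hxy (congrArg Prod.fst h)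
  have hknd' : d.keys.Nodup := hknd
  have hcontx : d.contains x = true := (PySem.Dict.contains_iff_mem_keys d x).mpr hx
  have hgx : d.getD x [] = lx := PySem.Dict.getD_of_mem_items d hpx hknd' []
  have hgy : d.getD y [] = ly := PySem.Dict.getD_of_mem_items d hpy hknd' []
  -- heads and tails of the two merged chains
  have hheadx : lx.head? = some x := hhead _ hpx
  have hheady : ly.head? = some y := hhead _ hpy
  have hxin : x ∈ lx := List.mem_of_mem_head? hheadx
  have hyin : y ∈ ly := List.mem_of_mem_head? hheady
  obtain ⟨t, htl, htget⟩ := hlast _ hpx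
  obtain ⟨ty, htly, htgety⟩ := hlast _ hpy
  have htin : t ∈ lx := List.mem_of_getLast? htl
  have htyin : ty ∈ ly := List.mem_of_getLast? htly
  have hlxne : lx ≠ [] := by rintro rfl; simp at hheadx
  have hlyne : ly ≠ [] := by rintro rfl; simp at hheady
  -- bounds
  have hbnd : ∀ u, pvVals d.items u → 1 ≤ u ∧ u ≤ n := fun u h => (hmem u).mp h
  have hlxb : ∀ u ∈ lx, 1 ≤ u ∧ u ≤ n := fun u hu => hbnd u ⟨(x, lx), hpx, hu⟩
  have hlyb : ∀ u ∈ ly, 1 ≤ u ∧ u ≤ n := fun u hu => hbnd u ⟨(y, ly), hpy, hu⟩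
  have hxb := hlxb x hxin
  have hyb := hlyb y hyin
  have htb := hlxb t htin
  have htyb := hlyb ty htyin
  have hn1 : 1 ≤ n := by omega
  have hcast : ((n + 1).toNat : Int) = n + 1 := by omega
  -- the new A-state components
  have hA1 : (stepA (nx, la, ib) (x, y)).1 = PySem.List.pySetD nx t y := by
    simp [stepA, PySem.List.pyGetD, htget]
  have hA2 : (stepA (nx, la, ib) (x, y)).2.1 = PySem.List.pySetD la x ty := by
    simp [stepA, PySem.List.pyGetD, htgety]
  have hA3 : (stepA (nx, la, ib) (x, y)).2.2 = PySem.List.pySetD ib y false := by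
    simp [stepA]
  -- the new B-state item list
  have hits : (stepB d (x, y)).items
      = (d.items.map (fun p => if p.1 == x then (x, lx ++ ly) else p)).filter
          (fun p => !(p.1 == y)) := by
    show ((d.insert x (d.getD x [] ++ d.getD y [])).erase y).items = _
    rw [hgx, hgy]
    simp only [PySem.Dict.erase]
    rw [PySem.Dict.items_insert_of_contains d _ hcontx]
  have hfkey : ∀ p : Int × List Int, ((if p.1 == x then (x, lx ++ ly) else p) : Int × List Int).1 = p.1 := by
    intro p; by_cases h : p.1 = x <;> simp [h]
  have hfkey' : ∀ p : Int × List Int,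
      ((if p.1 = x then ((x, lx ++ ly) : Int × List Int) else p)).1 = p.1 := by
    intro p; by_cases h : p.1 = x <;> simp [h]
  have hchar : ∀ p, p ∈ (stepB d (x, y)).items ↔
      ∃ q ∈ d.items, q.1 ≠ y ∧ p = (if q.1 = x then ((x, lx ++ ly) : Int × List Int) else q) := by
    intro p
    rw [hits]
    simp only [List.mem_filter, List.mem_map]
    constructor
    · rintro ⟨⟨q, hq, rfl⟩, hne⟩
      refine ⟨q, hq, ?_, ?_⟩
      · simpa [hfkey'] using hne
      · by_cases h : q.1 = x <;> simp [h]
    · rintro ⟨q, hq, hqy, rfl⟩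
      refine ⟨⟨q, hq, ?_⟩, ?_⟩
      · by_cases h : q.1 = x <;> simp [h]
      · simpa [hfkey'] using hqy
  have hkeys2 : ∀ u, u ∈ pvKeys (stepB d (x, y)).items ↔ u ∈ pvKeys d.items ∧ u ≠ y := by
    intro u
    rw [hits, pvKeysFilterMap _ _ hfkey, List.mem_filter]
    simp
  -- pairwise-entry facts reused below
  have hqx : ∀ q ∈ d.items, q.1 = x → q = (x, lx) := fun q hq h =>
    pvKeyInj d.items hknd q (x, lx) hq hpx h
  have hqy : ∀ q ∈ d.items, q.1 = y → q = (y, ly) := fun q hq h =>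
    pvKeyInj d.items hknd q (y, ly) hq hpy h
  have hdxy : ∀ u ∈ lx, u ∉ ly := hdisj _ hpx _ hpy hpxy
  have hvals2 : ∀ u, pvVals (stepB d (x, y)).items u ↔ pvVals d.items u := by
    intro u
    constructor
    · rintro ⟨p, hp, hu⟩
      obtain ⟨q, hq, hqney, rfl⟩ := (hchar p).mp hp
      by_cases h : q.1 = x
      · rw [if_pos h] at hu
        rcases List.mem_append.mp hu with h1 | h1
        · exact ⟨(x, lx), hpx, h1⟩
        · exact ⟨(y, ly), hpy, h1⟩
      · rw [if_neg h] at hu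
        exact ⟨q, hq, hu⟩
    · rintro ⟨q, hq, hu⟩
      by_cases h1 : q.1 = y
      · have := hqy q hq h1; subst this
        exact ⟨(x, lx ++ ly), (hchar _).mpr ⟨(x, lx), hpx, hxy, by simp⟩,
          List.mem_append.mpr (Or.inr hu)⟩
      · by_cases h2 : q.1 = x
        · have := hqx q hq h2; subst this
          exact ⟨(x, lx ++ ly), (hchar _).mpr ⟨(x, lx), hpx, hxy, by simp⟩,
            List.mem_append.mpr (Or.inl hu)⟩
        · exact ⟨q, (hchar _).mpr ⟨q, hq, h1, by simp [h2]⟩, hu⟩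
  refine ⟨⟨?_, ?_, ?_, ?_, ?_, ?_, ?_, ?_, ?_, ?_, ?_⟩, hkeys2⟩
  · rw [hA1, PySem.List.length_pySetD]; exact hnxl
  · rw [hA2, PySem.List.length_pySetD]; exact hlal
  · rw [hA3, PySem.List.length_pySetD]; exact hibl
  · -- keys nodup
    rw [hits, pvKeysFilterMap _ _ hfkey]
    exact hknd.filter _
  · -- heads
    intro p hp
    obtain ⟨q, hq, hqney, rfl⟩ := (hchar p).mp hp
    by_cases h : q.1 = x
    · simp only [if_pos h]
      rw [List.head?_append, hheadx]
      rfl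
    · simp only [if_neg h]
      exact hhead q hq
  · -- per-entry nodup
    intro p hp
    obtain ⟨q, hq, hqney, rfl⟩ := (hchar p).mp hp
    by_cases h : q.1 = x
    · simp only [if_pos h]
      exact List.Nodup.append (hnod _ hpx) (hnod _ hpy) hdxy
    · simp only [if_neg h]
      exact hnod q hq
  · -- pairwise disjoint
    intro p hp q hq hpq u hup
    obtain ⟨p0, hp0, hp0y, rfl⟩ := (hchar p).mp hp
    obtain ⟨q0, hq0, hq0y, rfl⟩ := (hchar q).mp hq
    by_cases h1 : p0.1 = x <;> by_cases h2 : q0.1 = x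
    · exact absurd (by simp [h1, h2]) hpq
    · simp only [if_pos h1] at hup
      simp only [if_neg h2]
      have hq0x : q0 ≠ (x, lx) := fun h => h2 (by rw [h])
      have hq0y' : q0 ≠ (y, ly) := fun h => hq0y (by rw [h])
      rcases List.mem_append.mp hup with h3 | h3
      · exact hdisj _ hpx _ hq0 (Ne.symm hq0x) u h3
      · exact hdisj _ hpy _ hq0 (Ne.symm hq0y') u h3
    · simp only [if_neg h1] at hup
      simp only [if_pos h2]
      intro hcon
      have hp0x : p0 ≠ (x, lx) := fun h => h1 (by rw [h])
      have hp0y' : p0 ≠ (y, ly) := fun h => hp0y (by rw [h])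
      rcases List.mem_append.mp hcon with h3 | h3
      · exact hdisj _ hpx _ hp0 (Ne.symm hp0x) u h3 hup
      · exact hdisj _ hpy _ hp0 (Ne.symm hp0y') u h3 hup
    · simp only [if_neg h1] at hup
      simp only [if_neg h2]
      have hne : p0 ≠ q0 := fun h => hpq (by rw [h])
      exact hdisj _ hp0 _ hq0 hne u hup
  · -- membership range
    intro u
    rw [hvals2]
    exact hmem u
  · -- adjacency / next
    intro p hp u v huv
    rw [hA1]
    have hub : 1 ≤ u ∧ u ≤ n := by
      refine hbnd u ((hvals2 u).mp ⟨p, hp, pvAdj_mem huv⟩)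
    have hget := pvGetSet nx t u y (by omega) (by rw [hnxl]; omega) (by omega) (by rw [hnxl]; omega)
    rw [hget]
    obtain ⟨q, hq, hqney, rfl⟩ := (hchar p).mp hp
    by_cases h : q.1 = x
    · simp only [if_pos h] at huv
      rcases pvAdj_append_cases huv with hc | hc | ⟨hc1, hc2⟩
      · have hunt : u ≠ t := by
          intro h'
          exact pvAdj_ne_last (hnod _ hpx) hc (h' ▸ htl)
        rw [if_neg hunt, hadj _ hpx u v hc]; rfl
      · have hunt : u ≠ t := by
          intro h'
          exact hdxy t htin (h' ▸ pvAdj_mem hc)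
        rw [if_neg hunt, hadj _ hpy u v hc]; rfl
      · have hut : u = t := by rw [hc1] at htl; exact Option.some.inj htl
        have hvy : v = y := by rw [hheady] at hc2; exact (Option.some.inj hc2).symm
        rw [if_pos hut, hvy]
    · simp only [if_neg h] at huv
      have hqx' : q ≠ (x, lx) := fun h' => h (by rw [h'])
      have hunt : u ≠ t := by
        intro h'
        exact hdisj _ hq _ hpx hqx' u (pvAdj_mem huv) (h' ▸ htin)
      rw [if_neg hunt, hadj _ hq u v huv]; rfl
  · -- last pointers
    intro p hp
    rw [hA2]
    obtain ⟨q, hq, hqney, rfl⟩ := (hchar p).mp hp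
    have hkb : ∀ r ∈ d.items, 1 ≤ (r : Int × List Int).1 ∧ r.1 ≤ n := fun r hr =>
      hbnd r.1 ⟨r, hr, List.mem_of_mem_head? (hhead r hr)⟩
    by_cases h : q.1 = x
    · simp only [if_pos h]
      refine ⟨ty, ?_, ?_⟩
      · rw [List.getLast?_append]
        simp [htly, Option.or_of_isSome]
      · have hget := pvGetSet la x x ty (by omega) (by rw [hlal]; omega) (by omega) (by rw [hlal]; omega)
        rw [hget, if_pos rfl]
    · simp only [if_neg h]
      obtain ⟨tq, h1, h2⟩ := hlast q hq
      have hqb := hkb q hq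
      have hget := pvGetSet la x q.1 ty (by omega) (by rw [hlal]; omega) (by omega) (by rw [hlal]; omega)
      exact ⟨tq, h1, by rw [hget, if_neg h, h2]; rfl⟩
  · -- is_beginning
    intro u h1 h2
    rw [hA3]
    have hget := pvGetSet ib y u false (by omega) (by rw [hibl]; omega) (by omega) (by rw [hibl]; omega)
    rw [hget]
    by_cases h : u = y
    · rw [if_pos h]
      have : u ∉ pvKeys (stepB d (x, y)).items := fun hc => ((hkeys2 u).mp hc).2 h
      simp [this]
    · rw [if_neg h, hib u h1 h2]
      have : (u ∈ pvKeys (stepB d (x, y)).items) ↔ (u ∈ pvKeys d.items) := by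
        rw [hkeys2 u]; tauto
      simp [this]

-- the parallel run of validity fold, A's fold and B's fold
lemma pvRun (n : Int) (ms : List (Int × Int)) :
    ∀ (L : List Int) (nx la : List Int) (ib : List Bool) (d : PySem.Dict Int (List Int)),
    (∀ u, u ∈ pvKeys d.items ↔ u ∈ L) → L.Nodup → pvInv n nx la ib d.items →
    (ms.foldl stepP (some L)).isSome →
    ∃ L', ms.foldl stepP (some L) = some L' ∧ L'.Nodup ∧
      L'.length + ms.length = L.length ∧
      (∀ u, u ∈ pvKeys (ms.foldl stepB d).items ↔ u ∈ L') ∧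
      pvInv n (ms.foldl stepA (nx, la, ib)).1 (ms.foldl stepA (nx, la, ib)).2.1
        (ms.foldl stepA (nx, la, ib)).2.2 (ms.foldl stepB d).items := by
  induction ms with
  | nil =>
    intro L nx la ib d hmem hnd hInv hsome
    exact ⟨L, rfl, hnd, by simp, hmem, hInv⟩
  | cons m ms ih =>
    intro L nx la ib d hmem hnd hInv hsome
    obtain ⟨x, y⟩ := m
    simp only [List.foldl_cons, List.length_cons] at hsome ⊢
    by_cases hc : x ∈ L ∧ y ∈ L ∧ x ≠ y
    · obtain ⟨hxL, hyL, hxy⟩ := hc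
      have hstep : stepP (some L) (x, y) = some (L.erase y) := by
        simp [stepP, hxL, hyL, hxy]
      rw [hstep] at hsome ⊢
      obtain ⟨hInv', hkeys'⟩ :=
        pvStepPreserve n nx la ib d x y hInv ((hmem x).mpr hxL) ((hmem y).mpr hyL) hxy
      have hmem' : ∀ u, u ∈ pvKeys (stepB d (x, y)).items ↔ u ∈ L.erase y := by
        intro u
        rw [hkeys' u, hnd.mem_erase_iff, hmem u]
        tauto
      obtain ⟨L', h1, h2, h3, h4, h5⟩ :=
        ih (L.erase y) _ _ _ (stepB d (x, y)) hmem' (hnd.erase y) hInv' hsome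
      refine ⟨L', h1, h2, ?_, h4, by simpa using h5⟩
      have he := List.length_erase_of_mem hyL
      have hp : 0 < L.length := List.length_pos_of_mem hyL
      omega
    · exfalso
      have hnone : stepP (some L) (x, y) = none := by simp [stepP, hc]
      rw [hnone, pvFoldPNone] at hsome
      simp at hsome

lemma pvWhileFindEq (ib : List Bool) (h : Int) (hh : PySem.List.pyGet? ib h = some true) :
    ∀ (fuel : Nat) (beg : Int), 1 ≤ beg → beg ≤ h →
    (∀ u, beg ≤ u → u < h → PySem.List.pyGet? ib u = some false) →
    (h - beg).toNat < fuel → whileFind ib beg fuel = h := by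
  intro fuel
  induction fuel with
  | zero => intro beg h1 h2 h3 h4; omega
  | succ f ih =>
    intro beg h1 h2 h3 h4
    by_cases hb : beg = h
    · subst hb; simp [whileFind, hh]
    · have hlt : beg < h := by omega
      have hf := h3 beg le_rfl hlt
      simp only [whileFind, hf]
      exact ih (beg + 1) (by omega) (by omega) (fun u hu1 hu2 => h3 u (by omega) hu2) (by omega)

def pvChase (nx : List Int) : Int → Nat → List Int
  | _, 0 => []
  | c, m + 1 => c :: pvChase nx (PySem.List.pyGetD nx c (-1)) m

lemma pvFoldlChase (nx : List Int) (l : List Int) :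
    ∀ (acc : List Int) (c : Int),
    (l.foldl (fun (p : List Int × Int) _ => (p.1 ++ [p.2], PySem.List.pyGetD nx p.2 (-1))) (acc, c)).1
      = acc ++ pvChase nx c l.length := by
  induction l with
  | nil => intro acc c; simp [pvChase]
  | cons e l ih =>
    intro acc c
    simp only [List.foldl_cons, List.length_cons, pvChase]
    rw [ih]
    simp

lemma pvChaseSpec (nx : List Int) (l : List Int) :
    ∀ c, l.head? = some c → (∀ u v, pvAdj u v l → PySem.List.pyGet? nx u = some v) →
    pvChase nx c l.length = l := by
  induction l with
  | nil => intro c hc; simp at hc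
  | cons c0 l ih =>
    intro c hc hadj
    simp only [List.head?_cons, Option.some.injEq] at hc
    subst hc
    cases l with
    | nil => simp [pvChase]
    | cons v l' =>
      have h0 : pvAdj c0 v (c0 :: v :: l') := ⟨0, rfl, rfl⟩
      have hnext := hadj _ _ h0
      simp only [List.length_cons, pvChase]
      have hgd : PySem.List.pyGetD nx c0 (-1) = v := by simp [PySem.List.pyGetD, hnext]
      rw [hgd]
      congr 1
      exact ih v rfl (fun u w huw => hadj u w (pvAdj_cons huw))

lemma pvInitLast (n : Int) :
    ∀ m : Int, 1 ≤ m → m ≤ n + 1 →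
    ((PySem.List.pyRange 1 m 1).foldl (fun l i => PySem.List.pySetD l i i)
        (List.replicate (n + 1).toNat 0)).length = (n + 1).toNat ∧
    (∀ j : Int, 1 ≤ j → j < m → PySem.List.pyGet?
        ((PySem.List.pyRange 1 m 1).foldl (fun l i => PySem.List.pySetD l i i)
          (List.replicate (n + 1).toNat 0)) j = some j) := by
  intro m
  refine Int.le_induction ?_ ?_ m
  · intro _
    constructor
    · rw [PySem.List.pyRange_one_eq_nil le_rfl]; simp
    · intro j h1 h2; omega
  · intro m hm ih hbound
    rw [PySem.List.pyRange_one_succ_right hm, List.foldl_append]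
    obtain ⟨ihl, ihg⟩ := ih (by omega)
    simp only [List.foldl_cons, List.foldl_nil]
    refine ⟨by rw [PySem.List.length_pySetD]; exact ihl, ?_⟩
    intro j h1 h2
    have hget := pvGetSet _ m j m (by omega) (by rw [ihl]; omega) (by omega) (by rw [ihl]; omega)
    rw [hget]
    by_cases h : j = m
    · simp [h]
    · rw [if_neg h, ihg j h1 (by omega)]; rfl

lemma pvReplicateGet {α : Type} (c : α) (m : Nat) (u : Int) (h1 : 0 ≤ u) (h2 : u < (m : Int)) :
    PySem.List.pyGet? (List.replicate m c) u = some c := by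
  rw [PySem.List.pyGet?_of_nonneg _ h1, List.getElem?_replicate]
  have : u.toNat < m := by omega
  simp [this]

-- a Nodup list whose elements are all h, containing h, is [h]
lemma pvSingletonOf (l : List Int) (h : Int) (hnd : l.Nodup) (hall : ∀ u ∈ l, u = h)
    (hmem : h ∈ l) : l = [h] := by
  cases l with
  | nil => simp at hmem
  | cons e l' =>
    have he : e = h := hall e (by simp)
    subst he
    cases l' with
    | nil => rfl
    | cons e2 l'' =>
      have h2 : e2 = e := hall e2 (by simp)
      simp [h2] at hnd

-- ===== VERDICT (by name: the statement is the Claim_ definition above) =====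
theorem joinstrings_spec : Claim_equal_joinstrings := by
  intro n s a b hdom hpre
  obtain ⟨hn1, hsl, hab, hval⟩ := hpre
  unfold Spec_joinstrings
  -- the merge-pair list
  have hfoldA : ∀ (init : List Int × List Int × List Bool),
      (PySem.List.pyRange 1 n 1).foldl
        (fun st i => stepA st (PySem.List.pyGetD a i 0, PySem.List.pyGetD b i 0)) init
      = ((PySem.List.pyRange 1 n 1).map
          (fun i => (PySem.List.pyGetD a i 0, PySem.List.pyGetD b i 0))).foldl stepA init := by
    intro init; rw [List.foldl_map]
  have hfoldB : ∀ (d : PySem.Dict Int (List Int)),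
      (PySem.List.pyRange 1 n 1).foldl
        (fun d i => stepB d (PySem.List.pyGetD a i 0, PySem.List.pyGetD b i 0)) d
      = ((PySem.List.pyRange 1 n 1).map
          (fun i => (PySem.List.pyGetD a i 0, PySem.List.pyGetD b i 0))).foldl stepB d := by
    intro d; rw [List.foldl_map]
  set ms := (PySem.List.pyRange 1 n 1).map
      (fun i => (PySem.List.pyGetD a i 0, PySem.List.pyGetD b i 0)) with hms
  set L0 := PySem.List.pyRange 1 (n + 1) 1 with hL0
  set next0 := List.replicate (n + 1).toNat (-1 : Int) with hnext0
  set isb0 := List.replicate (n + 1).toNat true with hisb0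
  set last1 := (PySem.List.pyRange 1 (n + 1) 1).foldl (fun l i => PySem.List.pySetD l i i)
      (List.replicate (n + 1).toNat 0) with hlast1
  set d0 := (PySem.List.pyRange 1 (n + 1) 1).foldl (fun d i => d.insert i [i])
      (PySem.Dict.empty : PySem.Dict Int (List Int)) with hd0
  obtain ⟨hlast1len, hlast1get⟩ := pvInitLast n (n + 1) (by omega) le_rfl
  have hL0nd : L0.Nodup := PySem.List.nodup_pyRange_one 1 (n + 1)
  have hd0items : d0.items = L0.map (fun i => (i, [i])) := by
    rw [hd0, hL0]
    have hfresh := PySem.Dict.items_foldl_insert_fresh (PySem.List.pyRange 1 (n + 1) 1)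
      (fun i => i) (fun i => ([i] : List Int)) PySem.Dict.empty
      (fun i _ => by simp) (by simpa using PySem.List.nodup_pyRange_one 1 (n + 1))
    simpa using hfresh
  have hkeysd0 : pvKeys d0.items = L0 := by
    rw [hd0items]; simp [pvKeys, List.map_map, Function.comp_def]
  have hInv0 : pvInv n next0 last1 isb0 d0.items := by
    refine ⟨by simp [hnext0], hlast1len, by simp [hisb0], ?_, ?_, ?_, ?_, ?_, ?_, ?_, ?_⟩
    · rw [hkeysd0]; exact hL0nd
    · intro p hp
      rw [hd0items] at hp
      obtain ⟨i, hi, rfl⟩ := List.mem_map.mp hp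
      rfl
    · intro p hp
      rw [hd0items] at hp
      obtain ⟨i, hi, rfl⟩ := List.mem_map.mp hp
      simp
    · intro p hp q hq hpq u hup hucq
      rw [hd0items] at hp hq
      obtain ⟨i, hi, rfl⟩ := List.mem_map.mp hp
      obtain ⟨j, hj, rfl⟩ := List.mem_map.mp hq
      simp only [List.mem_singleton] at hup hucq
      subst hup; subst hucq
      exact hpq rfl
    · intro u
      constructor
      · rintro ⟨p, hp, hu⟩
        rw [hd0items] at hp
        obtain ⟨i, hi, rfl⟩ := List.mem_map.mp hp
        simp only [List.mem_singleton] at hu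
        subst hu
        have := PySem.List.mem_pyRange_one.mp hi
        omega
      · intro hu
        refine ⟨(u, [u]), ?_, by simp⟩
        rw [hd0items]
        exact List.mem_map.mpr ⟨u, PySem.List.mem_pyRange_one.mpr (by omega), rfl⟩
    · intro p hp u v huv
      rw [hd0items] at hp
      obtain ⟨i, hi, rfl⟩ := List.mem_map.mp hp
      exact absurd huv (fun hcon => pvAdj_singleton hcon)
    · intro p hp
      rw [hd0items] at hp
      obtain ⟨i, hi, rfl⟩ := List.mem_map.mp hp
      have := PySem.List.mem_pyRange_one.mp hi
      exact ⟨i, rfl, hlast1get i (by omega) (by omega)⟩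
    · intro u h1 h2
      rw [hisb0, pvReplicateGet true _ u (by omega) (by omega)]
      have hmemk : u ∈ pvKeys d0.items := by
        rw [hkeysd0, hL0]
        exact PySem.List.mem_pyRange_one.mpr (by omega)
      simp [hmemk]
  have hmem0 : ∀ u, u ∈ pvKeys d0.items ↔ u ∈ L0 := by
    intro u
    rw [hkeysd0]
  obtain ⟨L', hL', hL'nd, hL'len, hmem', hInv'⟩ :=
    pvRun n ms L0 next0 last1 isb0 d0 hmem0 hL0nd hInv0 hval
  have hmsl : ms.length = (n - 1).toNat := by
    rw [hms]; simp [PySem.List.length_pyRange_one]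
  have hL0l : L0.length = n.toNat := by
    rw [hL0]; simp [PySem.List.length_pyRange_one]
  have hL'1 : L'.length = 1 := by omega
  obtain ⟨h, rfl⟩ : ∃ h, L' = [h] := by
    cases L' with
    | nil => simp at hL'1
    | cons h t =>
      cases t with
      | nil => exact ⟨h, rfl⟩
      | cons => simp at hL'1
  obtain ⟨hnxl, hlal, hibl, hknd, hhead, hnod, hdisj, hmemI, hadj, hlastI, hibI⟩ := hInv'
  have hkeys1 : pvKeys (ms.foldl stepB d0).items = [h] := by
    refine pvSingletonOf _ h hknd (fun u hu => by simpa using (hmem' u).mp hu) ?_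
    exact (hmem' h).mpr (by simp)
  have hlen1 : (ms.foldl stepB d0).items.length = 1 := by
    have := congrArg List.length hkeys1
    simpa [pvKeys] using this
  obtain ⟨p1, hits1⟩ : ∃ p1, (ms.foldl stepB d0).items = [p1] := by
    cases hI : (ms.foldl stepB d0).items with
    | nil => rw [hI] at hlen1; simp at hlen1
    | cons p rest =>
      rw [hI] at hlen1
      cases rest with
      | nil => exact ⟨p, rfl⟩
      | cons => simp at hlen1
  have hp1 : p1.1 = h := by
    rw [hits1] at hkeys1
    simpa [pvKeys] using hkeys1
  have hp1mem : p1 ∈ (ms.foldl stepB d0).items := by rw [hits1]; simp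
  have hheadl : p1.2.head? = some h := by
    have := hhead p1 hp1mem
    rwa [hp1] at this
  have hlnd : p1.2.Nodup := hnod p1 hp1mem
  have hlmem : ∀ u, u ∈ p1.2 ↔ (1 ≤ u ∧ u ≤ n) := by
    intro u
    rw [← hmemI u]
    constructor
    · intro hu; exact ⟨p1, hp1mem, hu⟩
    · rintro ⟨q, hq, hu⟩
      rw [hits1] at hq
      simp only [List.mem_singleton] at hq
      subst hq; exact hu
  have hlperm : p1.2.Perm L0 := by
    refine (List.perm_ext_iff_of_nodup hlnd hL0nd).mpr ?_
    intro u
    rw [hlmem u, hL0, PySem.List.mem_pyRange_one]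
    omega
  have hllen : p1.2.length = n.toNat := by rw [hlperm.length_eq, hL0l]
  have hhmem : h ∈ p1.2 := List.mem_of_mem_head? hheadl
  have hhb : 1 ≤ h ∧ h ≤ n := (hlmem h).mp hhmem
  -- A's head scan finds h
  have hwhile : whileFind (ms.foldl stepA (next0, last1, isb0)).2.2 1 (n + 1).toNat = h := by
    refine pvWhileFindEq _ h ?_ (n + 1).toNat 1 le_rfl (by omega) ?_ (by omega)
    · rw [hibI h (by omega) (by omega), hkeys1]
      simp
    · intro u h1 h2
      rw [hibI u (by omega) (by omega), hkeys1]
      have : u ≠ h := by omega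
      simp [this]
  -- A's pointer chase produces p1.2
  have hchaseEq : pvChase (ms.foldl stepA (next0, last1, isb0)).1 h (PySem.List.pyRange 0 n 1).length = p1.2 := by
    have hlen' : (PySem.List.pyRange 0 n 1).length = p1.2.length := by
      rw [hllen]; simp [PySem.List.length_pyRange_one]
    rw [hlen']
    exact pvChaseSpec _ p1.2 h hheadl (fun u v huv => hadj p1 hp1mem u v huv)
  -- B's surviving value list is p1.2
  have hBlist : (PySem.Dict.values (ms.foldl stepB d0)).headD [] = p1.2 := by
    show ((ms.foldl stepB d0).items.map (fun x => x.2)).headD [] = p1.2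
    rw [hits1]
    rfl
  -- assemble
  simp only [joinstrings, joinstrings_alt]
  rw [hfoldA, hfoldB, hwhile, hBlist, pvFoldlChase, hchaseEq, List.nil_append]
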